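-- pv_equiv track=rewrite | github.com/fabriziocosta/abstractgraph-generative | src/abstractgraph_generative/story/graph_to_text.py | _signatures_compatible
-- ===== SOURCE A (Python) =====
-- def _normalize_event_type_for_match(event_type: str) -> str:
--     """Normalize event type for robust repair matching."""
--
--     value = str(event_type or "OTHER_EVENT").upper()
--     if value in {"DECIDE", "PLAN", "THINK", "BELIEVE", "ATTEMPT"}:
--         return "COGNITIVE_EVENT"
--     return value
--
-- def _signatures_compatible(
--     left: list[tuple[str, tuple[tuple[str, str], ...]]],
--     right: list[tuple[str, tuple[tuple[str, str], ...]]],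
-- ) -> bool:
--     """Return True if two signatures preserve order/agents under coarse typing."""
--
--     if len(left) != len(right):
--         return False
--     for (lt, lroles), (rt, rroles) in zip(left, right):
--         nlt = _normalize_event_type_for_match(lt)
--         nrt = _normalize_event_type_for_match(rt)
--         if nlt != nrt:
--             return False
--
--         ldict = {k: v for k, v in lroles}
--         rdict = {k: v for k, v in rroles}
--         for role in ("AGENT", "PATIENT", "TARGET", "RECIPIENT", "INSTRUMENT"):
--             lv = ldict.get(role, "")
--             rv = rdict.get(role, "")
--             if lv or rv:
--                 if lv != rv:
--                     return False
--
--         lcore = tuple((k, ldict.get(k, "")) for k in ("AGENT", "PATIENT", "TARGET", "RECIPIENT", "INSTRUMENT"))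
--         rcore = tuple((k, rdict.get(k, "")) for k in ("AGENT", "PATIENT", "TARGET", "RECIPIENT", "INSTRUMENT"))
--         if lcore != rcore:
--             return False
--     return True
-- ===== SOURCE B (Python) =====
-- _CORE = ("AGENT", "PATIENT", "TARGET", "RECIPIENT", "INSTRUMENT")
--
--
-- def _normalize_event_type_for_match(event_type: str) -> str:
--     """Normalize event type for robust repair matching."""
--
--     value = str(event_type or "OTHER_EVENT").upper()
--     if value in {"DECIDE", "PLAN", "THINK", "BELIEVE", "ATTEMPT"}:
--         return "COGNITIVE_EVENT"
--     return value
--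
--
-- def _signatures_compatible(
--     left: list[tuple[str, tuple[tuple[str, str], ...]]],
--     right: list[tuple[str, tuple[tuple[str, str], ...]]],
-- ) -> bool:
--     """Return True if two signatures preserve order/agents under coarse typing."""
--
--     # Staged, role-major passes: compare whole columns of the two signatures
--     # rather than walking event pairs with an early-exit inner loop.
--     if len(left) != len(right):
--         return False
--     if [_normalize_event_type_for_match(t) for t, _ in left] != \
--        [_normalize_event_type_for_match(t) for t, _ in right]:
--         return False
--     for role in _CORE:
--         if [dict(rs).get(role, "") for _, rs in left] != \
--            [dict(rs).get(role, "") for _, rs in right]: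
--             return False
--     return True
-- ===== Notes on version B (the rewrite author's own statement) =====
-- stated objective: alternative
-- what changed: Replaces A's event-major early-exit zip loop (per-event role checks plus a redundant core-tuple comparison) with staged role-major passes: one pass comparing the columns of normalized types, then one pass per core role comparing that role's whole value column of the two signatures.
import Mathlib
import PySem

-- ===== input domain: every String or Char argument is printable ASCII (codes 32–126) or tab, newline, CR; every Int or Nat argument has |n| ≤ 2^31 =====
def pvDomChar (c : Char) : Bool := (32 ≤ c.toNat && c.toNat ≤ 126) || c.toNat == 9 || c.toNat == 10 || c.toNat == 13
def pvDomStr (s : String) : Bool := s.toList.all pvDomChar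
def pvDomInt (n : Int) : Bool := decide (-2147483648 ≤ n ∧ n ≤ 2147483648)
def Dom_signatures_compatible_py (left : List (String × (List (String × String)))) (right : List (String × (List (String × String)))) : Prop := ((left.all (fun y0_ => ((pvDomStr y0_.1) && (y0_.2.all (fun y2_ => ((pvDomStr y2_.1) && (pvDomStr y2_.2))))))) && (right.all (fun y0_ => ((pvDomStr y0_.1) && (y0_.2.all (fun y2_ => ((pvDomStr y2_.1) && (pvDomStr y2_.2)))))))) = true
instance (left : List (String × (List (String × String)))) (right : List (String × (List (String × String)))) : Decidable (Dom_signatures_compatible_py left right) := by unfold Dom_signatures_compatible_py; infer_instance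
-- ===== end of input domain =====

-- B replaces A's event-major early-exit zip loop by staged role-major passes:
-- one pass comparing the columns of normalized types, then one pass per core role
-- comparing that role's whole value column (alternative decomposition, same cost).

-- ===== PORT A =====
-- _normalize_event_type_for_match (shared helper of both Python files)
def normalize_event_type_for_match (event_type : String) : String :=
  let value := PySem.Str.upper (if event_type = "" then "OTHER_EVENT" else event_type)
  if value = "DECIDE" ∨ value = "PLAN" ∨ value = "THINK" ∨ value = "BELIEVE" ∨ value = "ATTEMPT" then
    "COGNITIVE_EVENT"
  else value

-- the 5 core roles ("AGENT", "PATIENT", "TARGET", "RECIPIENT", "INSTRUMENT"); _CORE in Source B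
def coreRoles : List String := ["AGENT", "PATIENT", "TARGET", "RECIPIENT", "INSTRUMENT"]

-- A's inner 'for role in (…)' loop with its early 'return False'
def roleLoopA (ld rd : PySem.Dict String String) : List String → Bool
  | [] => true
  | r :: rs =>
    let lv := ld.getD r ""
    let rv := rd.getD r ""
    if lv ≠ "" ∨ rv ≠ "" then
      if lv ≠ rv then false else roleLoopA ld rd rs
    else roleLoopA ld rd rs

-- A's 'for … in zip(left, right)' loop with its early returns
def sigLoopA : List ((String × List (String × String)) × (String × List (String × String))) → Bool
  | [] => true
  | ((lt, lroles), (rt, rroles)) :: rest =>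
    let nlt := normalize_event_type_for_match lt
    let nrt := normalize_event_type_for_match rt
    if nlt ≠ nrt then false
    else
      let ldict := PySem.Dict.ofList lroles
      let rdict := PySem.Dict.ofList rroles
      if roleLoopA ldict rdict coreRoles = false then false
      else
        let lcore := coreRoles.map (fun k => (k, ldict.getD k ""))
        let rcore := coreRoles.map (fun k => (k, rdict.getD k ""))
        if lcore ≠ rcore then false
        else sigLoopA rest

def signatures_compatible_py (left : List (String × (List (String × String)))) (right : List (String × (List (String × String)))) : Bool :=
  if left.length ≠ right.length then false
  else sigLoopA (left.zip right)

-- ===== PORT B =====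
-- the column of one role's values across a whole signature: [dict(rs).get(role, "") for _, rs in sig]
def roleColumn (role : String) (sig : List (String × List (String × String))) : List String :=
  sig.map (fun p => (PySem.Dict.ofList p.2).getD role "")

-- the column of normalized event types: [_normalize_event_type_for_match(t) for t, _ in sig]
def typeColumn (sig : List (String × List (String × String))) : List String :=
  sig.map (fun p => normalize_event_type_for_match p.1)

-- B's 'for role in _CORE' loop: one whole-column comparison per role
def roleLoopB (left right : List (String × List (String × String))) : List String → Bool
  | [] => true
  | r :: rs =>
    if roleColumn r left ≠ roleColumn r right then false
    else roleLoopB left right rs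

def signatures_compatible_py_alt (left : List (String × (List (String × String)))) (right : List (String × (List (String × String)))) : Bool :=
  if left.length ≠ right.length then false
  else if typeColumn left ≠ typeColumn right then false
  else roleLoopB left right coreRoles

-- ===== PRECONDITION & SPEC =====
def Spec_signatures_compatible_py (left : List (String × (List (String × String)))) (right : List (String × (List (String × String)))) (out : Bool) : Prop := out = signatures_compatible_py_alt left right
instance (left : List (String × (List (String × String)))) (right : List (String × (List (String × String)))) (out : Bool) : Decidable (Spec_signatures_compatible_py left right out) := by unfold Spec_signatures_compatible_py; infer_instance

-- ===== CLAIM (what is proved, stated in full; the proofs are below) =====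
def Claim_equal_signatures_compatible_py : Prop := ∀ (left : List (String × (List (String × String)))) (right : List (String × (List (String × String)))), Dom_signatures_compatible_py left right → Spec_signatures_compatible_py left right (signatures_compatible_py left right)

-- ===== LEMMAS AND PROOFS =====

-- canonical form of one event, used only as an intermediate notion in the proof
def canonEvent (p : String × List (String × String)) : String × List String :=
  let d := PySem.Dict.ofList p.2
  (normalize_event_type_for_match p.1, coreRoles.map (fun r => d.getD r ""))

def canonical (sig : List (String × List (String × String))) : List (String × List String) :=
  sig.map canonEvent

-- pairing each key with its value preserves/reflects equality of the value lists
lemma map_pair_eq_iff (f g : String → String) (rs : List String) :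
    (rs.map (fun k => (k, f k)) = rs.map (fun k => (k, g k))) ↔ (rs.map f = rs.map g) := by
  induction rs with
  | nil => simp
  | cons r rs ih => simp [ih]

-- A's per-role early-exit loop succeeds exactly when the two core-role value maps agree
lemma roleLoop_eq (ld rd : PySem.Dict String String) (rs : List String) :
    roleLoopA ld rd rs
      = decide (rs.map (fun k => (k, ld.getD k "")) = rs.map (fun k => (k, rd.getD k ""))) := by
  induction rs with
  | nil => simp [roleLoopA]
  | cons r rs ih =>
    by_cases h : ld.getD r "" = rd.getD r ""
    · simp [roleLoopA, h, ih]
    · have h1 : ld.getD r "" ≠ "" ∨ rd.getD r "" ≠ "" := by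
        rcases eq_or_ne (ld.getD r "") "" with he | hne
        · refine Or.inr fun hr => h ?_; rw [he, hr]
        · exact Or.inl hne
      simp [roleLoopA, h, h1]

-- A's zip loop computes equality of the two canonical forms (given equal lengths)
lemma sigLoop_eq : ∀ (ls rs : List (String × List (String × String))), ls.length = rs.length →
    sigLoopA (ls.zip rs) = decide (canonical ls = canonical rs) := by
  intro ls
  induction ls with
  | nil =>
    intro rs h
    cases rs with
    | nil => simp [sigLoopA, canonical]
    | cons q rs => simp at h
  | cons p ls ih =>
    intro rs h
    cases rs with
    | nil => simp at h
    | cons q rs =>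
      obtain ⟨lt, lroles⟩ := p
      obtain ⟨rt, rroles⟩ := q
      simp only [List.length_cons, Nat.add_right_cancel_iff] at h
      by_cases ht : normalize_event_type_for_match lt = normalize_event_type_for_match rt
      · by_cases hv : (coreRoles.map (fun k => (PySem.Dict.ofList lroles).getD k ""))
            = (coreRoles.map (fun k => (PySem.Dict.ofList rroles).getD k ""))
        · have hm := (map_pair_eq_iff (fun k => (PySem.Dict.ofList lroles).getD k "")
            (fun k => (PySem.Dict.ofList rroles).getD k "") coreRoles).mpr hv
          have h1 : sigLoopA (((lt, lroles), (rt, rroles)) :: ls.zip rs) = sigLoopA (ls.zip rs) := by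
            simp [sigLoopA, ht, roleLoop_eq, hm]
          have h2 : (canonical ((lt, lroles) :: ls) = canonical ((rt, rroles) :: rs))
              ↔ (canonical ls = canonical rs) := by
            simp [canonical, canonEvent, ht, hv]
          rw [List.zip_cons_cons, h1, ih rs h]
          exact (decide_eq_decide.mpr h2.symm)
        · have hm := (map_pair_eq_iff (fun k => (PySem.Dict.ofList lroles).getD k "")
            (fun k => (PySem.Dict.ofList rroles).getD k "") coreRoles).not.mpr hv
          simp [sigLoopA, List.zip, ht, roleLoop_eq, hm, canonical, canonEvent, hv]
      · simp [sigLoopA, List.zip, ht, canonical, canonEvent]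

-- B's role loop computes the conjunction of the column equalities
lemma roleLoopB_eq (left right : List (String × List (String × String))) (rs : List String) :
    roleLoopB left right rs
      = decide (∀ r ∈ rs, roleColumn r left = roleColumn r right) := by
  induction rs with
  | nil => simp [roleLoopB]
  | cons r rs ih => by_cases h : roleColumn r left = roleColumn r right <;> simp [roleLoopB, h, ih]

-- canonical (row-wise) equality ⇔ column-wise equality, for equal-length signatures
lemma canonical_eq_cols : ∀ (ls rs : List (String × List (String × String))), ls.length = rs.length →
    ((canonical ls = canonical rs)
      ↔ (typeColumn ls = typeColumn rs ∧ ∀ r ∈ coreRoles, roleColumn r ls = roleColumn r rs)) := by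
  intro ls
  induction ls with
  | nil =>
    intro rs h
    cases rs with
    | nil => simp [canonical, typeColumn, roleColumn]
    | cons q rs => simp at h
  | cons p ls ih =>
    intro rs h
    cases rs with
    | nil => simp at h
    | cons q rs =>
      simp only [List.length_cons, Nat.add_right_cancel_iff] at h
      have := ih rs h
      simp only [canonical, typeColumn, roleColumn, List.map_cons, List.cons_eq_cons,
        canonEvent, Prod.mk.injEq, List.map_eq_map_iff] at *
      constructor
      · rintro ⟨⟨h1, h2⟩, h3⟩
        rcases this.mp h3 with ⟨h4, h5⟩
        exact ⟨⟨h1, h4⟩, fun r hr => ⟨h2 r hr, h5 r hr⟩⟩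
      · rintro ⟨⟨h1, h4⟩, h25⟩
        exact ⟨⟨h1, fun r hr => (h25 r hr).1⟩, this.mpr ⟨h4, fun r hr => (h25 r hr).2⟩⟩

-- ===== VERDICT (by name: the statement is the Claim_ definition above) =====
theorem signatures_compatible_py_spec : Claim_equal_signatures_compatible_py := by
  intro left right _
  unfold Spec_signatures_compatible_py signatures_compatible_py signatures_compatible_py_alt
  by_cases hlen : left.length = right.length
  · rw [sigLoop_eq left right hlen, roleLoopB_eq]
    by_cases ht : typeColumn left = typeColumn right
    · have hd : (decide (canonical left = canonical right) : Bool)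
          = decide (∀ r ∈ coreRoles, roleColumn r left = roleColumn r right) := by
        rcases canonical_eq_cols left right hlen with ⟨h1, h2⟩
        exact decide_eq_decide.mpr ⟨fun hc => (h1 hc).2, fun hr => h2 ⟨ht, hr⟩⟩
      simp [hlen, ht, hd]
    · have hc : canonical left ≠ canonical right := fun hc =>
        ht ((canonical_eq_cols left right hlen).mp hc).1
      simp [hlen, ht, hc]
  · simp [hlen]
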